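-- pv_equiv track=rewrite | github.com/JungleHuh/- | SpartaDay4/1083re.py | maximize_array
-- ===== SOURCE A (Python) =====
-- def maximize_array(arr, S):
--     n = len(arr)
--
--     # 남은 스왑 횟수를 추적합니다.
--     swaps_left = S
--
--     # 배열을 순차적으로 확인하면서, 가능한 가장 큰 값을 앞으로 이동시킵니다.
--     for i in range(n):
--         if swaps_left <= 0:
--             break
--
--         # 현재 위치에서부터 swaps_left 범위 내에서 가장 큰 값을 찾아야 합니다.
--         max_idx = i
--         for j in range(i + 1, min(i + swaps_left + 1, n)):
--             if arr[j] > arr[max_idx]: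
--                 max_idx = j
--
--         # max_idx에 있는 가장 큰 값을 앞으로 이동시키기 위해 스왑합니다.
--         for j in range(max_idx, i, -1):
--             arr[j], arr[j - 1] = arr[j - 1], arr[j]
--
--         # 사용한 스왑 횟수를 차감합니다.
--         swaps_left -= (max_idx - i)
--
--     return arr
-- ===== SOURCE B (Python) =====
-- def maximize_array(arr, S):
--     # Builds the result forward by popping the first maximum of the allowed
--     # window from a working copy (no adjacent-swap shifting loop).
--     # Note: unlike A, this does not mutate `arr`; return values agree.
--     remaining = list(arr)
--     result = []
--     swaps_left = S
--     while swaps_left > 0 and remaining: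
--         window = remaining[:swaps_left + 1]
--         j = window.index(max(window))
--         result.append(remaining.pop(j))
--         swaps_left -= j
--     return result + remaining
-- ===== Notes on version B (the rewrite author's own statement) =====
-- stated objective: alternative
-- what changed: Replaces the in-place adjacent-swap shifting (hand-written index scan for the max plus an inner bubble loop moving the element one slot at a time) by rebuilding the array forward: slice the window, pop its first maximum from a working copy and append it to the result; no element-shifting loop remains (B also does not mutate its argument, only the return value is claimed equal).
import Mathlib
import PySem

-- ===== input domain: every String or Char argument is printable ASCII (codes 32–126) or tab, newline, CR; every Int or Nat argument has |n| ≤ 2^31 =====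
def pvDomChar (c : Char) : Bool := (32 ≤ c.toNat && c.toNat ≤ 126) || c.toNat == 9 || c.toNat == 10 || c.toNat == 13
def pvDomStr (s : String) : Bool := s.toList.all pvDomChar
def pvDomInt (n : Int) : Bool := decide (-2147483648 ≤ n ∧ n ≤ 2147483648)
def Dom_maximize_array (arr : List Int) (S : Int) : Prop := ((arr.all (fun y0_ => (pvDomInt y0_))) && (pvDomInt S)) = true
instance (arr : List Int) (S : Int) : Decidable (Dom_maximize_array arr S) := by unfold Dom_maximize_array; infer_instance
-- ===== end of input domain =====

-- B rebuilds the array by popping the first window-maximum from a working copy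
-- instead of A's in-place adjacent-swap shifting; return values agree (A also
-- mutates its argument in place, B does not — equivalence is about the return value).

-- ===== PORT A =====
-- inner loop `for j in range(i+1, min(i+swaps_left+1, n)): if arr[j] > arr[max_idx]: max_idx = j`
-- (hand-ported for-loop, exact: same iteration order, same comparison)
def pvMaxLoop (xs : List Int) (j m mi : Nat) : Nat :=
  if j < m then
    pvMaxLoop xs (j + 1) m (if xs.getD j 0 > xs.getD mi 0 then j else mi)
  else mi
termination_by m - j

-- one step `arr[j], arr[j-1] = arr[j-1], arr[j]`
def pvAdjSwap (xs : List Int) (j : Nat) : List Int :=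
  (xs.set j (xs.getD (j - 1) 0)).set (j - 1) (xs.getD j 0)

-- shifting loop `for j in range(max_idx, i, -1): swap` (hand-ported, exact: descends from max_idx to i+1)
def pvShiftLoop (xs : List Int) (j i : Nat) : List Int :=
  if i < j then pvShiftLoop (pvAdjSwap xs j) (j - 1) i else xs
termination_by j

-- outer loop `for i in range(n)` with the `break` on swaps_left <= 0
def pvOuter (xs : List Int) (i n : Nat) (swaps : Int) : List Int :=
  if i < n then
    if swaps ≤ 0 then xs
    else
      let bound : Nat := min (i + swaps.toNat + 1) n   -- min(i + swaps_left + 1, n); swaps > 0 here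
      let mi := pvMaxLoop xs (i + 1) bound i
      pvOuter (pvShiftLoop xs mi i) (i + 1) n (swaps - ((mi - i : Nat) : Int))
  else xs
termination_by n - i

def maximize_array (arr : List Int) (S : Int) : List Int :=
  pvOuter arr 0 arr.length S

-- ===== PORT B =====
-- `while swaps_left > 0 and remaining: window = remaining[:swaps_left+1];
--  j = window.index(max(window)); result.append(remaining.pop(j)); swaps_left -= j`
def pvGoB (rem : List Int) (swaps : Int) : List Int :=
  if h : 0 < swaps ∧ rem ≠ [] then
    let window := PySem.List.slice rem none (some (swaps + 1))
    match PySem.List.max? window (fun y => y) with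
    | none => rem            -- unreachable: window is nonempty
    | some mv =>
      match PySem.List.index? window mv with
      | none => rem          -- unreachable: mv ∈ window
      | some j =>
        match hp : PySem.List.pop? rem (j : Int) with
        | none => rem        -- unreachable: j < rem.length
        | some (v, rest) => v :: pvGoB rest (swaps - (j : Int))
  else rem
termination_by rem.length
decreasing_by
  have h2 : rest.length + 1 = rem.length := PySem.List.length_of_pop?_eq_some rem hp
  omega

def maximize_array_alt (arr : List Int) (S : Int) : List Int :=
  pvGoB arr S

-- ===== PRECONDITION & SPEC =====
def Spec_maximize_array (arr : List Int) (S : Int) (out : List Int) : Prop := out = maximize_array_alt arr S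
instance (arr : List Int) (S : Int) (out : List Int) : Decidable (Spec_maximize_array arr S out) := by unfold Spec_maximize_array; infer_instance

-- ===== CLAIM (what is proved, stated in full; the proofs are below) =====
def Claim_equal_maximize_array : Prop := ∀ (arr : List Int) (S : Int), Dom_maximize_array arr S → Spec_maximize_array arr S (maximize_array arr S)

-- ===== LEMMAS AND PROOFS =====

-- one step of the (max value, index of FIRST maximum) recursion
def pvStep (x : Int) (o : Option (Int × Nat)) : Option (Int × Nat) :=
  match o with
  | none => some (x, 0)
  | some (m, j) => if m > x then some (m, j + 1) else some (x, 0)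

-- (max value, index of FIRST maximum) of a nonempty list; none on []
def pvFam : List Int → Option (Int × Nat)
  | [] => none
  | x :: t => pvStep x (pvFam t)

theorem pvFam_cons_isSome (x : Int) (t : List Int) : (pvFam (x :: t)).isSome := by
  cases h : pvFam t
  · simp [pvFam, pvStep, h]
  · rename_i p; simp only [pvFam, pvStep, h]; split <;> simp

theorem pvFam_eq_none (t : List Int) (h : pvFam t = none) : t = [] := by
  cases t with
  | nil => rfl
  | cons x t' => have := pvFam_cons_isSome x t'; simp [h] at this

theorem pvFoldlMaxComm (u : List Int) : ∀ (a b : Int), u.foldl max (max a b) = max a (u.foldl max b) := by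
  induction u with
  | nil => intro a b; simp
  | cons z u' ihu => intro a b; simp only [List.foldl_cons]; rw [max_assoc, ihu]

theorem pvFam_fst (t : List Int) : ∀ (x m : Int) (j : Nat),
    pvFam (x :: t) = some (m, j) → m = t.foldl max x := by
  induction t with
  | nil =>
    intro x m j h
    simp only [pvFam, pvStep, Option.some.injEq, Prod.mk.injEq] at h
    simpa using h.1.symm
  | cons y t' ih =>
    intro x m j h
    cases hy : pvFam (y :: t') with
    | none => have := pvFam_cons_isSome y t'; simp [hy] at this
    | some p =>
      obtain ⟨m', j'⟩ := p
      have hm' : m' = t'.foldl max y := ih y m' j' hy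
      have hfold : (y :: t').foldl max x = max x m' := by
        simp only [List.foldl_cons]
        rw [pvFoldlMaxComm, ← hm']
      rw [hfold]
      rw [show pvFam (x :: y :: t') = pvStep x (pvFam (y :: t')) from rfl, hy] at h
      simp only [pvStep] at h
      split at h <;> simp only [Option.some.injEq, Prod.mk.injEq] at h <;> omega

theorem pvFam_index (t : List Int) : ∀ (x m : Int) (j : Nat),
    pvFam (x :: t) = some (m, j) → PySem.List.index? (x :: t) m = some j := by
  induction t with
  | nil =>
    intro x m j h
    simp only [pvFam, pvStep, Option.some.injEq, Prod.mk.injEq] at h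
    rw [← h.1, ← h.2]
    exact PySem.List.index?_cons_self x []
  | cons y t' ih =>
    intro x m j h
    cases hy : pvFam (y :: t') with
    | none => have := pvFam_cons_isSome y t'; simp [hy] at this
    | some p =>
      obtain ⟨m', j'⟩ := p
      rw [show pvFam (x :: y :: t') = pvStep x (pvFam (y :: t')) from rfl, hy] at h
      simp only [pvStep] at h
      split at h
      · rename_i hgt
        simp only [Option.some.injEq, Prod.mk.injEq] at h
        obtain ⟨h1, h2⟩ := h
        rw [PySem.List.index?_cons_of_ne _ (show x ≠ m by omega), ← h1, ih y m' j' hy]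
        simp [h2]
      · rename_i hgt
        simp only [Option.some.injEq, Prod.mk.injEq] at h
        rw [← h.1, ← h.2]
        exact PySem.List.index?_cons_self x (y :: t')

theorem pvFam_lt_length (t : List Int) : ∀ (x m : Int) (j : Nat),
    pvFam (x :: t) = some (m, j) → j < (x :: t).length := by
  induction t with
  | nil =>
    intro x m j h
    simp only [pvFam, pvStep, Option.some.injEq, Prod.mk.injEq] at h
    simp [← h.2]
  | cons y t' ih =>
    intro x m j h
    cases hy : pvFam (y :: t') with
    | none => have := pvFam_cons_isSome y t'; simp [hy] at this
    | some p =>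
      obtain ⟨m', j'⟩ := p
      have hlt := ih y m' j' hy
      rw [show pvFam (x :: y :: t') = pvStep x (pvFam (y :: t')) from rfl, hy] at h
      simp only [pvStep] at h
      simp only [List.length_cons] at hlt ⊢
      split at h <;> simp only [Option.some.injEq, Prod.mk.injEq] at h <;> omega

-- A's left-scan argmax accumulator, as a pure function of the scanned window
def pvAux : List Int → Int × Nat → Nat → Int × Nat
  | [], p, _ => p
  | x :: t, (bv, bi), cur => pvAux t (if x > bv then (x, cur) else (bv, bi)) (cur + 1)

theorem pvAux_fam_some (t : List Int) : ∀ (m : Int) (j : Nat) (bv : Int) (bi cur : Nat),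
    pvFam t = some (m, j) →
    pvAux t (bv, bi) cur = if m > bv then (m, cur + j) else (bv, bi) := by
  induction t with
  | nil => intro m j bv bi cur h; simp [pvFam] at h
  | cons x t' ih =>
    intro m j bv bi cur h
    simp only [pvAux]
    cases hx : pvFam t' with
    | none =>
      have ht : t' = [] := pvFam_eq_none t' hx
      subst ht
      simp only [pvFam, pvStep, Option.some.injEq, Prod.mk.injEq] at h
      obtain ⟨h1, h2⟩ := h   -- h1 : x = m, h2 : 0 = j
      by_cases hgt : x > bv
      · rw [if_pos hgt, if_pos (show m > bv by omega)]
        simp only [pvAux, Prod.mk.injEq]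
        constructor <;> omega
      · rw [if_neg hgt, if_neg (show ¬ m > bv by omega)]
        simp [pvAux]
    | some q =>
      obtain ⟨m', j'⟩ := q
      simp only [pvFam, hx, pvStep] at h
      split at h <;> rename_i hmx <;>
        simp only [Option.some.injEq, Prod.mk.injEq] at h <;>
        obtain ⟨h1, h2⟩ := h
      · -- m' > x : m' = m, j' + 1 = j
        by_cases hgt : x > bv
        · rw [if_pos hgt, ih m' j' x cur (cur + 1) hx,
            if_pos hmx, if_pos (show m > bv by omega)]
          simp only [Prod.mk.injEq]
          constructor <;> omega
        · rw [if_neg hgt, ih m' j' bv bi (cur + 1) hx]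
          by_cases hmb : m' > bv
          · rw [if_pos hmb, if_pos (show m > bv by omega)]
            simp only [Prod.mk.injEq]
            constructor <;> omega
          · rw [if_neg hmb, if_neg (show ¬ m > bv by omega)]
      · -- ¬ m' > x : x = m, 0 = j
        by_cases hgt : x > bv
        · rw [if_pos hgt, ih m' j' x cur (cur + 1) hx,
            if_neg hmx, if_pos (show m > bv by omega)]
          simp only [Prod.mk.injEq]
          constructor <;> omega
        · rw [if_neg hgt, ih m' j' bv bi (cur + 1) hx,
            if_neg (show ¬ m' > bv by omega), if_neg (show ¬ m > bv by omega)]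

-- pvMaxLoop reads only the window (xs.drop j).take (m - j) and behaves as pvAux
theorem pvMaxLoop_eq_aux (xs : List Int) :
    ∀ (k m j mi : Nat), m ≤ xs.length → k = m - j →
      pvMaxLoop xs j m mi = (pvAux ((xs.drop j).take (m - j)) (xs.getD mi 0, mi) j).2 := by
  intro k
  induction k with
  | zero =>
    intro m j mi hm hk
    have hnj : ¬ j < m := by omega
    rw [pvMaxLoop]
    simp [hnj, show m - j = 0 by omega, pvAux]
  | succ k' ih =>
    intro m j mi hm hk
    have hjm : j < m := by omega
    have hjlen : j < xs.length := by omega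
    rw [pvMaxLoop]
    simp only [if_pos hjm]
    have hdrop : xs.drop j = xs.getD j 0 :: xs.drop (j + 1) := by
      rw [List.getD_eq_getElem?_getD, List.getElem?_eq_getElem hjlen]
      exact (List.getElem_cons_drop hjlen).symm
    conv_rhs => rw [hdrop, show m - j = (m - (j + 1)) + 1 from by omega]
    simp only [List.take_succ_cons, pvAux]
    by_cases hgt : xs.getD j 0 > xs.getD mi 0
    · rw [if_pos hgt, if_pos hgt, ih m (j + 1) j hm (by omega)]
    · rw [if_neg hgt, if_neg hgt, ih m (j + 1) mi hm (by omega)]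

-- one adjacent swap across an append boundary
theorem pvAdjSwap_mid (L : List Int) (a b : Int) (R : List Int) :
    pvAdjSwap (L ++ a :: b :: R) (L.length + 1) = L ++ b :: a :: R := by
  unfold pvAdjSwap
  have h1 : (L ++ a :: b :: R).getD (L.length + 1 - 1) 0 = a := by
    rw [show L.length + 1 - 1 = L.length by omega,
      List.getD_append_right _ _ _ _ (le_refl _)]
    simp
  have h2 : (L ++ a :: b :: R).getD (L.length + 1) 0 = b := by
    rw [List.getD_append_right _ _ _ _ (by omega)]
    simp [show L.length + 1 - L.length = 1 by omega]
  rw [h1, h2]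
  rw [List.set_append_right _ _ (by omega)]
  rw [show L.length + 1 - L.length = 1 by omega]
  rw [List.set_append_right _ _ (by omega)]
  rw [show L.length + 1 - 1 - L.length = 0 by omega]
  simp [List.set]

-- the shifting loop rotates the element at offset j of rem to rem's front
theorem pvShiftLoop_rotate : ∀ (j : Nat) (done pre suf : List Int) (v : Int), pre.length = j →
    pvShiftLoop (done ++ pre ++ v :: suf) (done.length + j) done.length =
      done ++ v :: (pre ++ suf) := by
  intro j
  induction j with
  | zero =>
    intro done pre suf v hlen
    have : pre = [] := List.eq_nil_of_length_eq_zero hlen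
    subst this
    rw [pvShiftLoop]
    simp
  | succ j' ih =>
    intro done pre suf v hlen
    obtain ⟨p, w, rfl⟩ : ∃ p w, pre = p ++ [w] :=
      ⟨pre.dropLast, pre.getLast (by intro h; subst h; simp at hlen),
        (List.dropLast_append_getLast _).symm⟩
    have hp : p.length = j' := by simp at hlen; omega
    rw [pvShiftLoop]
    rw [if_pos (by omega : done.length < done.length + (j' + 1))]
    have hswap : pvAdjSwap (done ++ (p ++ [w]) ++ v :: suf) (done.length + (j' + 1)) =
        done ++ p ++ v :: w :: suf := by
      rw [show done ++ (p ++ [w]) ++ v :: suf = (done ++ p) ++ w :: v :: suf by simp]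
      rw [show done.length + (j' + 1) = (done ++ p).length + 1 by
        simp only [List.length_append, hp]; omega]
      rw [pvAdjSwap_mid]
    rw [hswap, show done.length + (j' + 1) - 1 = done.length + j' by omega]
    have := ih done p (w :: suf) v hp
    rw [show done ++ p ++ v :: w :: suf = done ++ p ++ v :: (w :: suf) by simp, this]
    simp

-- the outer-loop / pvGoB simulation
theorem pvOuter_goB : ∀ (fuel : Nat) (rem done : List Int) (swaps : Int), rem.length = fuel →
    pvOuter (done ++ rem) done.length (done.length + rem.length) swaps = done ++ pvGoB rem swaps := by
  intro fuel
  induction fuel with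
  | zero =>
    intro rem done swaps hlen
    have : rem = [] := List.eq_nil_of_length_eq_zero hlen
    subst this
    rw [pvOuter.eq_def, pvGoB.eq_def]
    simp
  | succ k ihf =>
    intro rem done swaps hlen
    obtain ⟨r, rs, rfl⟩ : ∃ r rs, rem = r :: rs := by
      cases rem with
      | nil => simp at hlen
      | cons r rs => exact ⟨r, rs, rfl⟩
    rw [pvOuter.eq_def]
    rw [if_pos (by simp : done.length < done.length + (r :: rs).length)]
    by_cases hsw : swaps ≤ 0
    · rw [if_pos hsw, pvGoB.eq_def]
      rw [dif_neg (by rintro ⟨h1, _⟩; omega)]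
    · rw [if_neg hsw]
      dsimp only
      have hswpos : 0 < swaps := by omega
      -- window on the B side
      have hwin : PySem.List.slice (r :: rs) none (some (swaps + 1)) =
          r :: rs.take swaps.toNat := by
        rw [PySem.List.slice_to _ (by omega : (0:Int) ≤ swaps + 1)]
        rw [show (swaps + 1).toNat = swaps.toNat + 1 by omega]
        simp
      -- first argmax of the window
      cases hfam : pvFam (r :: rs.take swaps.toNat) with
      | none => have := pvFam_cons_isSome r (rs.take swaps.toNat); simp [hfam] at this
      | some p =>
        obtain ⟨mv, jB⟩ := p
        have hjlt : jB < (r :: rs.take swaps.toNat).length :=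
          pvFam_lt_length _ r mv jB hfam
        have hjrem : jB < (r :: rs).length := by
          simp only [List.length_cons, List.length_take] at hjlt ⊢; omega
        -- A side: the scanned max index is done.length + jB
        have hmi : pvMaxLoop (done ++ r :: rs) (done.length + 1)
            (min (done.length + swaps.toNat + 1) (done.length + (r :: rs).length)) done.length =
            done.length + jB := by
          set bound := min (done.length + swaps.toNat + 1) (done.length + (r :: rs).length) with hbdef
          have hble : bound ≤ (done ++ r :: rs).length := by
            simp only [hbdef, List.length_append, List.length_cons]
            omega
          rw [pvMaxLoop_eq_aux _ (bound - (done.length + 1)) bound (done.length + 1) done.length hble rfl]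
          have hdrop : (done ++ r :: rs).drop (done.length + 1) = rs := by
            rw [show done ++ r :: rs = (done ++ [r]) ++ rs by simp,
              show done.length + 1 = (done ++ [r]).length by simp]
            simp
          have hgd : (done ++ r :: rs).getD done.length 0 = r := by
            rw [List.getD_append_right _ _ _ _ (le_refl _)]
            simp
          have htake : rs.take (bound - (done.length + 1)) = rs.take swaps.toNat := by
            rw [show bound - (done.length + 1) = min swaps.toNat rs.length by
              simp only [hbdef, List.length_cons]; omega]
            rw [← List.take_take]
            simp
          rw [hdrop, hgd, htake]
          cases hft : pvFam (rs.take swaps.toNat) with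
          | none =>
            have hnil : rs.take swaps.toNat = [] := pvFam_eq_none _ hft
            rw [hnil]
            simp only [pvFam, hnil, pvStep] at hfam
            simp only [Option.some.injEq, Prod.mk.injEq] at hfam
            simp [pvAux, ← hfam.2]
          | some q =>
            obtain ⟨m', j'⟩ := q
            rw [pvAux_fam_some _ m' j' r done.length (done.length + 1) hft]
            simp only [pvFam, hft, pvStep] at hfam
            split at hfam <;> rename_i hc <;>
              simp only [Option.some.injEq, Prod.mk.injEq] at hfam
            · rw [if_pos hc]
              simp only
              omega
            · rw [if_neg hc]
              simp only
              omega
        rw [hmi]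
        -- A side: the shift rotates element jB to the front
        have hshift : pvShiftLoop (done ++ r :: rs) (done.length + jB) done.length =
            done ++ (r :: rs).getD jB 0 :: (r :: rs).eraseIdx jB := by
          have hdecomp : r :: rs =
              (r :: rs).take jB ++ (r :: rs).getD jB 0 :: (r :: rs).drop (jB + 1) := by
            rw [List.getD_eq_getElem?_getD, List.getElem?_eq_getElem hjrem]
            simp only [Option.getD_some]
            rw [List.getElem_cons_drop hjrem]
            exact (List.take_append_drop jB (r :: rs)).symm
          have hlen' : ((r :: rs).take jB).length = jB := by
            simp only [List.length_take, List.length_cons] at hjrem ⊢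
            omega
          calc pvShiftLoop (done ++ r :: rs) (done.length + jB) done.length
              = pvShiftLoop (done ++ (r :: rs).take jB ++
                  (r :: rs).getD jB 0 :: (r :: rs).drop (jB + 1))
                  (done.length + jB) done.length := by
                  rw [List.append_assoc, ← hdecomp]
            _ = done ++ (r :: rs).getD jB 0 ::
                  ((r :: rs).take jB ++ (r :: rs).drop (jB + 1)) :=
                  pvShiftLoop_rotate jB done _ _ _ hlen'
            _ = done ++ (r :: rs).getD jB 0 :: (r :: rs).eraseIdx jB := by
                  rw [List.eraseIdx_eq_take_drop_succ]
        rw [hshift]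
        -- B side: unfold pvGoB one step
        have hmax : PySem.List.max? (r :: rs.take swaps.toNat) (fun y => y) = some mv := by
          rw [PySem.List.max?_id_cons]
          exact congrArg some (pvFam_fst _ r mv jB hfam).symm
        have hidx : PySem.List.index? (r :: rs.take swaps.toNat) mv = some jB :=
          pvFam_index _ r mv jB hfam
        have hpop : PySem.List.pop? (r :: rs) ((jB : Nat) : Int) =
            some ((r :: rs).getD jB 0, (r :: rs).eraseIdx jB) := by
          rw [PySem.List.pop?_natCast _ _ hjrem]
          rw [List.getD_eq_getElem?_getD, List.getElem?_eq_getElem hjrem]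
          simp
        have hgoB : pvGoB (r :: rs) swaps =
            (r :: rs).getD jB 0 :: pvGoB ((r :: rs).eraseIdx jB) (swaps - (jB : Int)) := by
          rw [pvGoB.eq_def]
          rw [dif_pos (⟨hswpos, by simp⟩ : 0 < swaps ∧ r :: rs ≠ [])]
          dsimp only
          simp only [hwin, hmax, hidx]
          split
          · rename_i heq
            rw [hpop] at heq
            cases heq
          · rename_i v rest heq
            rw [hpop] at heq
            simp only [Option.some.injEq, Prod.mk.injEq] at heq
            rw [heq.1, heq.2]
        rw [hgoB]
        -- recurse
        rw [show (done.length + jB - done.length : Nat) = jB by omega]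
        have herlen : ((r :: rs).eraseIdx jB).length = k := by
          rw [List.length_eraseIdx_of_lt hjrem]
          simp only [List.length_cons] at hlen ⊢
          omega
        have hrec := ihf ((r :: rs).eraseIdx jB) (done ++ [(r :: rs).getD jB 0])
          (swaps - (jB : Int)) herlen
        simp only [List.append_assoc, List.singleton_append, List.length_append,
          List.length_singleton] at hrec
        rw [show done.length + 1 + ((r :: rs).eraseIdx jB).length =
          done.length + (r :: rs).length by
            rw [herlen]; simp only [List.length_cons] at hlen ⊢; omega] at hrec
        exact hrec

-- ===== VERDICT (by name: the statement is the Claim_ definition above) =====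
theorem maximize_array_spec : Claim_equal_maximize_array := by
  intro arr S _
  unfold Spec_maximize_array maximize_array maximize_array_alt
  have := pvOuter_goB arr.length arr [] S rfl
  simpa using this
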